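-- pv_equiv track=rewrite | github.com/jamiejamiebobamie/CTI-IPS-2020 | main 28.py | da_sort
-- ===== SOURCE A (Python) =====
-- def return_index_of_min_item(arr, start_i):
--   min_index = start_i
--   for i in range(start_i,len(arr)):
--     if arr[i] < arr[min_index]:
--       min_index = i
--   return min_index
--
-- def da_sort(nums):
--   # find the elements that are already sorted example: [2,1,3,5]
--   # only 1 is sorted in the above list as the 2 needs to come before 3
--
--   # intialize a count to 1. if there are any items in nums,
--     # at the very least the minimum element can be considered sorted.
--   count = 0
--   # find the index, x, of the min element in the list.
--   i = return_index_of_min_item(nums, 0)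
--   # add the elements that come before that element to a set.
--   iterated_items = set(nums[:i]) # should be noninclusive of i
--   # begin loop here
--   # repeat above steps except search an increasingly
--   # small subarray of nums for the min_element (SEARCH: nums[i+1:])
--   while i + 1 < len(nums):
--     store_i = i
--     i = return_index_of_min_item(nums, i+1)
--     for j in range(store_i+1,i):
--       iterated_items.add(nums[j])
--     for n in iterated_items:
--       if n < nums[i]:
--         return len(nums) - 1 - count
--     count+=1
--   # end loop here
--   return i-count
-- ===== SOURCE B (Python) =====
-- def da_sort(nums):
--     n = len(nums)
--     if n == 0:
--         return 0
--     # one right-to-left pass: mark suffix-minimum positions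
--     # (j is marked iff nums[j] <= every element to its right)
--     ischain = [False] * n
--     m = nums[n - 1]
--     ischain[n - 1] = True
--     for j in range(n - 2, -1, -1):
--         if nums[j] <= m:
--             m = nums[j]
--             ischain[j] = True
--     # one left-to-right pass: running min of unmarked elements;
--     # at each marked position after the first, compare it with that running min
--     count = 0
--     run = None
--     seen_first = False
--     lastc = 0
--     for j in range(n):
--         if ischain[j]:
--             lastc = j
--             if seen_first:
--                 if run is not None and run < nums[j]:
--                     return n - 1 - count
--                 count += 1
--             else:
--                 seen_first = True
--         else:
--             run = nums[j] if run is None else min(run, nums[j])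
--     return lastc - count
-- ===== Notes on version B (the rewrite author's own statement) =====
-- stated objective: faster
-- what changed: Replaces the repeated O(n) argmin rescans and the growing accumulated set with one right-to-left pass marking suffix-minimum positions plus one left-to-right pass that keeps a running minimum of the unmarked elements.
import Mathlib
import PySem

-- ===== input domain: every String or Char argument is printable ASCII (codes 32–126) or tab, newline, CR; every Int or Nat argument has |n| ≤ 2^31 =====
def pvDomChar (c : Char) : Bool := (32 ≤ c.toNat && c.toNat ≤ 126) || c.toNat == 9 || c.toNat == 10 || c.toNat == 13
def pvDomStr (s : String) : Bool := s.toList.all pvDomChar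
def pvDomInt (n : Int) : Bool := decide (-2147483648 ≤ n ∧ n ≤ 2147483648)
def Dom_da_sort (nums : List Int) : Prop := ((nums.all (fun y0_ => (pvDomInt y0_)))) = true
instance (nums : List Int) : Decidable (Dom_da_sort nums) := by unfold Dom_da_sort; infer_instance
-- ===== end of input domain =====

-- B replaces A's repeated argmin rescans with one right-to-left suffix-minimum marking pass
-- plus one left-to-right pass keeping a running min of unmarked elements (objective: faster).

-- ===== PORT A =====
-- Python: return_index_of_min_item(arr, start_i) — leftmost argmin of arr[start_i:]
def return_index_of_min_item (arr : List Int) (start_i : Nat) : Nat :=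
  (List.range' start_i (arr.length - start_i)).foldl
    (fun min_index i => if arr.getD i 0 < arr.getD min_index 0 then i else min_index) start_i

-- needed by the termination argument of the while-loop below
theorem return_index_of_min_item_ge (arr : List Int) (s : Nat) :
    s ≤ return_index_of_min_item arr s := by
  unfold return_index_of_min_item
  have h : ∀ (l : List Nat) (init : Nat), s ≤ init → (∀ i ∈ l, s ≤ i) →
      s ≤ l.foldl (fun mi i => if arr.getD i 0 < arr.getD mi 0 then i else mi) init := by
    intro l
    induction l with
    | nil => intro init h _; simpa using h
    | cons x xs ih =>
      intro init hinit hmem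
      simp only [List.foldl_cons]
      refine ih _ ?_ (fun i hi => hmem i (List.mem_cons_of_mem _ hi))
      split
      · exact hmem x (List.mem_cons_self)
      · exact hinit
  exact h _ s le_rfl (by intro i hi; exact (List.mem_range'_1.mp hi).1)

-- Python: the while-loop of da_sort (state: iterated_items, i, count)
def da_sort_loop (nums : List Int) (iterated_items : PySem.Set Int) (i count : Nat) : Int :=
  if i + 1 < nums.length then
    let i' := return_index_of_min_item nums (i + 1)
    let iterated' := (List.range' (i + 1) (i' - (i + 1))).foldl
      (fun s j => PySem.Set.add s (nums.getD j 0)) iterated_items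
    -- 'for n in iterated_items: if n < nums[i]: return …' — the returned value does not
    -- depend on which set element fires, so the set iteration is ported as an 'any'
    if iterated'.any (fun x_ => decide (x_ < nums.getD i' 0)) then
      (nums.length : Int) - 1 - (count : Int)
    else
      da_sort_loop nums iterated' i' (count + 1)
  else
    (i : Int) - (count : Int)
termination_by nums.length - i
decreasing_by
  have := return_index_of_min_item_ge nums (i + 1)
  omega

def da_sort (nums : List Int) : Int :=
  let i := return_index_of_min_item nums 0
  da_sort_loop nums (PySem.Set.ofList (nums.take i)) i 0

-- ===== PORT B =====
-- right-to-left pass of Source B: marks each position that is ≤ everything to its right,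
-- carrying the running suffix minimum (returned as the second component)
def da_sort_mark : List Int → List (Int × Bool) × Option Int
  | [] => ([], none)
  | x :: rest =>
    let (acc, m) := da_sort_mark rest
    match m with
    | none => ((x, true) :: acc, some x)
    | some mv => if x ≤ mv then ((x, true) :: acc, some x) else ((x, false) :: acc, some mv)

-- left-to-right pass of Source B (state: j, count, run, seen_first, lastc)
def da_sort_scan (n : Nat) : List (Int × Bool) → Nat → Nat → Option Int → Bool → Nat → Int
  | [], _, count, _, _, lastc => (lastc : Int) - (count : Int)
  | (x, b) :: rest, j, count, run, seen, lastc =>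
    if b then
      if seen then
        if (match run with | some r => decide (r < x) | none => false) then
          (n : Int) - 1 - (count : Int)
        else da_sort_scan n rest (j + 1) (count + 1) run seen j
      else da_sort_scan n rest (j + 1) count run true j
    else
      da_sort_scan n rest (j + 1) count
        (match run with | none => some x | some r => some (min r x)) seen lastc

def da_sort_alt (nums : List Int) : Int :=
  if nums.length = 0 then 0
  else da_sort_scan nums.length (da_sort_mark nums).1 0 0 none false 0

-- ===== PRECONDITION & SPEC =====
def Spec_da_sort (nums : List Int) (out : Int) : Prop := out = da_sort_alt nums
instance (nums : List Int) (out : Int) : Decidable (Spec_da_sort nums out) := by unfold Spec_da_sort; infer_instance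

-- ===== CLAIM (what is proved, stated in full; the proofs are below) =====
def Claim_equal_da_sort : Prop := ∀ (nums : List Int), Dom_da_sort nums → Spec_da_sort nums (da_sort nums)

-- ===== LEMMAS AND PROOFS =====

-- j is a "chain" (suffix-minimum) position: ≤ every element strictly to its right
def chainP (nums : List Int) (j : Nat) : Prop :=
  ∀ l, j < l → l < nums.length → nums.getD j 0 ≤ nums.getD l 0

def chainB (nums : List Int) (j : Nat) : Bool :=
  (nums.drop (j + 1)).all (fun y => decide (nums.getD j 0 ≤ y))

-- the common reference recursion both ports are reduced to: walk the chain positions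
def refWalk (nums : List Int) (i count : Nat) : Int :=
  if i + 1 < nums.length then
    let i' := return_index_of_min_item nums (i + 1)
    if (List.range i').any (fun l => !chainB nums l && decide (nums.getD l 0 < nums.getD i' 0)) then
      (nums.length : Int) - 1 - (count : Int)
    else refWalk nums i' (count + 1)
  else
    (i : Int) - (count : Int)
termination_by nums.length - i
decreasing_by
  have := return_index_of_min_item_ge nums (i + 1)
  omega

-- ----- small getD/membership helpers -----

theorem mem_iff_getD (l : List Int) (x : Int) :
    x ∈ l ↔ ∃ i, i < l.length ∧ l.getD i 0 = x := by
  rw [List.mem_iff_getElem]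
  constructor
  · rintro ⟨i, h, rfl⟩; exact ⟨i, h, by simp [List.getD_eq_getElem?_getD, List.getElem?_eq_getElem h]⟩
  · rintro ⟨i, h, rfl⟩; exact ⟨i, h, by simp [List.getD_eq_getElem?_getD, List.getElem?_eq_getElem h]⟩

theorem getD_take_eq (l : List Int) (k i : Nat) (hik : i < k) (hil : i < l.length) :
    (l.take k).getD i 0 = l.getD i 0 := by
  have h : i < (l.take k).length := by simp [List.length_take]; omega
  rw [List.getD_eq_getElem?_getD, List.getD_eq_getElem?_getD, List.getElem?_eq_getElem h,
    List.getElem?_eq_getElem hil, Option.getD_some, Option.getD_some, List.getElem_take]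

theorem getD_drop_eq (l : List Int) (k i : Nat) (hil : k + i < l.length) :
    (l.drop k).getD i 0 = l.getD (k + i) 0 := by
  have h : i < (l.drop k).length := by simp [List.length_drop]; omega
  rw [List.getD_eq_getElem?_getD, List.getD_eq_getElem?_getD, List.getElem?_eq_getElem h,
    List.getElem?_eq_getElem hil, Option.getD_some, Option.getD_some, List.getElem_drop]

theorem mem_take_iff_getD (l : List Int) (k : Nat) (x : Int) :
    x ∈ l.take k ↔ ∃ i, i < k ∧ i < l.length ∧ l.getD i 0 = x := by
  rw [mem_iff_getD]
  constructor
  · rintro ⟨i, h, rfl⟩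
    have hik : i < k := by simp [List.length_take] at h; omega
    have hil : i < l.length := by simp [List.length_take] at h; omega
    exact ⟨i, hik, hil, (getD_take_eq l k i hik hil).symm⟩
  · rintro ⟨i, hik, hil, rfl⟩
    have h : i < (l.take k).length := by simp [List.length_take]; omega
    exact ⟨i, h, getD_take_eq l k i hik hil⟩

theorem mem_drop_iff_getD (l : List Int) (k : Nat) (x : Int) :
    x ∈ l.drop k ↔ ∃ i, k ≤ i ∧ i < l.length ∧ l.getD i 0 = x := by
  rw [mem_iff_getD]
  constructor
  · rintro ⟨i, h, rfl⟩
    have hil : k + i < l.length := by simp [List.length_drop] at h; omega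
    exact ⟨k + i, by omega, hil, (getD_drop_eq l k i hil).symm⟩
  · rintro ⟨i, hk, hil, rfl⟩
    have h : i - k < (l.drop k).length := by simp [List.length_drop]; omega
    have he : k + (i - k) = i := by omega
    exact ⟨i - k, h, by rw [getD_drop_eq l k (i - k) (by omega), he]⟩

theorem chainB_iff (nums : List Int) (j : Nat) :
    chainB nums j = true ↔ chainP nums j := by
  unfold chainB chainP
  rw [List.all_eq_true]
  constructor
  · intro h l hjl hln
    have : nums.getD l 0 ∈ nums.drop (j + 1) :=
      (mem_drop_iff_getD _ _ _).mpr ⟨l, by omega, hln, rfl⟩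
    simpa using h _ this
  · intro h y hy
    obtain ⟨i, hki, hil, rfl⟩ := (mem_drop_iff_getD _ _ _).mp hy
    simpa using h i (by omega) hil

theorem chainP_last (nums : List Int) (h : 0 < nums.length) :
    chainP nums (nums.length - 1) := by
  intro l h1 h2; omega

-- ----- the leftmost-argmin fold -----

theorem argmin_inv (nums : List Int) (s : Nat) : ∀ (k : Nat),
    s ≤ ((List.range' s k).foldl
        (fun mi i => if nums.getD i 0 < nums.getD mi 0 then i else mi) s) ∧
    (0 < k → ((List.range' s k).foldl
        (fun mi i => if nums.getD i 0 < nums.getD mi 0 then i else mi) s) < s + k) ∧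
    (∀ l, s ≤ l → l < s + k → nums.getD ((List.range' s k).foldl
        (fun mi i => if nums.getD i 0 < nums.getD mi 0 then i else mi) s) 0 ≤ nums.getD l 0) ∧
    (∀ l, s ≤ l → l < ((List.range' s k).foldl
        (fun mi i => if nums.getD i 0 < nums.getD mi 0 then i else mi) s) →
      nums.getD ((List.range' s k).foldl
        (fun mi i => if nums.getD i 0 < nums.getD mi 0 then i else mi) s) 0 < nums.getD l 0) := by
  intro k
  induction k with
  | zero =>
    refine ⟨le_rfl, by omega, by intro l h1 h2; omega, by intro l h1 h2; simp at h2; omega⟩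
  | succ k ih =>
    obtain ⟨h1, h2, h4, h5⟩ := ih
    rw [List.range'_1_concat, List.foldl_append, List.foldl_cons, List.foldl_nil]
    set r := ((List.range' s k).foldl
        (fun mi i => if nums.getD i 0 < nums.getD mi 0 then i else mi) s) with hr
    by_cases hc : nums.getD (s + k) 0 < nums.getD r 0
    · rw [if_pos hc]
      refine ⟨by omega, by omega, ?_, ?_⟩
      · intro l hl1 hl2
        rcases Nat.lt_or_ge l (s + k) with h | h
        · exact le_of_lt (lt_of_lt_of_le hc (h4 l hl1 h))
        · have : l = s + k := by omega
          subst this; exact le_rfl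
      · intro l hl1 hl2
        rcases Nat.lt_or_ge l r with h | h
        · exact lt_trans hc (h5 l hl1 h)
        · exact lt_of_lt_of_le hc (h4 l hl1 (by omega))
    · rw [if_neg hc]
      have hle : nums.getD r 0 ≤ nums.getD (s + k) 0 := le_of_not_gt hc
      refine ⟨h1, ?_, ?_, h5⟩
      · intro _
        rcases Nat.eq_zero_or_pos k with rfl | hk
        · have hr0 : r = s := by rw [hr]; simp [List.range']
          omega
        · have := h2 hk; omega
      · intro l hl1 hl2
        rcases Nat.lt_or_ge l (s + k) with h | h
        · exact h4 l hl1 h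
        · have : l = s + k := by omega
          subst this; exact hle

theorem retMin_spec (nums : List Int) (s : Nat) (hs : s < nums.length) :
    s ≤ return_index_of_min_item nums s ∧
    return_index_of_min_item nums s < nums.length ∧
    chainP nums (return_index_of_min_item nums s) ∧
    (∀ j, s ≤ j → j < return_index_of_min_item nums s → ¬ chainP nums j) := by
  obtain ⟨h1, h2, h4, h5⟩ := argmin_inv nums s (nums.length - s)
  have hsk : s + (nums.length - s) = nums.length := by omega
  rw [hsk] at h2 h4
  have hk : 0 < nums.length - s := by omega
  unfold return_index_of_min_item
  refine ⟨h1, h2 hk, ?_, ?_⟩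
  · intro l hl1 hl2
    exact h4 l (by omega) hl2
  · intro j hj1 hj2 hcj
    have hlt := h5 j hj1 hj2
    have hle := hcj _ hj2 (h2 hk)
    omega

theorem retMin_eq (nums : List Int) (s p : Nat) (hs : s < nums.length)
    (hp : chainP nums p) (hsp : s ≤ p)
    (hmin : ∀ l, s ≤ l → l < p → ¬ chainP nums l) :
    return_index_of_min_item nums s = p := by
  obtain ⟨h1, h2, h3, h4⟩ := retMin_spec nums s hs
  rcases lt_trichotomy (return_index_of_min_item nums s) p with h | h | h
  · exact absurd h3 (hmin _ h1 h)
  · exact h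
  · exact absurd hp (h4 p hsp h)

-- ----- the accumulated set -----

theorem mem_foldl_add (nums : List Int) (l : List Nat) (s0 : PySem.Set Int) (x : Int) :
    x ∈ l.foldl (fun s j => PySem.Set.add s (nums.getD j 0)) s0 ↔
      x ∈ s0 ∨ ∃ j ∈ l, nums.getD j 0 = x := by
  induction l generalizing s0 with
  | nil => simp
  | cons a t ih =>
    rw [List.foldl_cons, ih]
    rw [PySem.Set.mem_add]
    constructor
    · rintro ((h | h) | ⟨j, hj, rfl⟩)
      · exact Or.inl h
      · exact Or.inr ⟨a, List.mem_cons_self, h.symm⟩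
      · exact Or.inr ⟨j, List.mem_cons_of_mem _ hj, rfl⟩
    · rintro (h | ⟨j, hj, rfl⟩)
      · exact Or.inl (Or.inl h)
      · rcases List.mem_cons.mp hj with rfl | hj
        · exact Or.inl (Or.inr rfl)
        · exact Or.inr ⟨j, hj, rfl⟩

-- ----- A's loop equals the reference walk -----

theorem loop_eq_ref (nums : List Int) : ∀ (d i count : Nat) (iter : PySem.Set Int),
    nums.length - i ≤ d → i < nums.length → chainP nums i →
    (∀ x : Int, x ∈ iter ↔ ∃ l, l < i ∧ ¬ chainP nums l ∧ nums.getD l 0 = x) →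
    da_sort_loop nums iter i count = refWalk nums i count := by
  intro d
  induction d with
  | zero => intro i count iter hd hi _ _; omega
  | succ d ih =>
    intro i count iter hd hi hchain hiter
    rw [da_sort_loop, refWalk]
    simp only []
    by_cases hlt : i + 1 < nums.length
    · rw [if_pos hlt, if_pos hlt]
      obtain ⟨ha, hb, hc, hleft⟩ := retMin_spec nums (i + 1) hlt
      set i' := return_index_of_min_item nums (i + 1) with hi'
      have hmem : ∀ x : Int,
          x ∈ ((List.range' (i + 1) (i' - (i + 1))).foldl
            (fun s j => PySem.Set.add s (nums.getD j 0)) iter) ↔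
          ∃ l, l < i' ∧ ¬ chainP nums l ∧ nums.getD l 0 = x := by
        intro x
        rw [mem_foldl_add]
        constructor
        · rintro (hx | ⟨j, hj, rfl⟩)
          · obtain ⟨l, hl1, hl2, hl3⟩ := (hiter x).mp hx
            exact ⟨l, by omega, hl2, hl3⟩
          · have hjr := List.mem_range'_1.mp hj
            exact ⟨j, by omega, hleft j (by omega) (by omega), rfl⟩
        · rintro ⟨l, hl1, hl2, rfl⟩
          by_cases hli : l < i
          · exact Or.inl ((hiter _).mpr ⟨l, hli, hl2, rfl⟩)
          · have hne : l ≠ i := by rintro rfl; exact hl2 hchain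
            exact Or.inr ⟨l, List.mem_range'_1.mpr ⟨by omega, by omega⟩, rfl⟩
      have hcond : ((List.range' (i + 1) (i' - (i + 1))).foldl
            (fun s j => PySem.Set.add s (nums.getD j 0)) iter).any
              (fun x_ => decide (x_ < nums.getD i' 0))
          = (List.range i').any
              (fun l => !chainB nums l && decide (nums.getD l 0 < nums.getD i' 0)) := by
        rw [Bool.eq_iff_iff]
        simp only [List.any_eq_true, List.mem_range, Bool.and_eq_true,
          Bool.not_eq_eq_eq_not, Bool.not_true, decide_eq_true_eq]
        constructor
        · rintro ⟨x, hx, hxlt⟩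
          obtain ⟨l, hl1, hl2, rfl⟩ := (hmem x).mp hx
          refine ⟨l, hl1, ?_, hxlt⟩
          cases hcb : chainB nums l
          · rfl
          · exact absurd ((chainB_iff nums l).mp hcb) hl2
        · rintro ⟨l, hl1, hl2, hl3⟩
          refine ⟨nums.getD l 0, (hmem _).mpr ⟨l, hl1, ?_, rfl⟩, hl3⟩
          intro hcp
          rw [(chainB_iff nums l).mpr hcp] at hl2
          cases hl2
      rw [hcond]
      cases hcase : (List.range i').any
          (fun l => !chainB nums l && decide (nums.getD l 0 < nums.getD i' 0))
      · rw [if_neg (by exact Bool.false_ne_true), if_neg (by exact Bool.false_ne_true)]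
        exact ih i' (count + 1) _ (by omega) hb hc hmem
      · rw [if_pos (by simp), if_pos (by simp)]
    · rw [if_neg hlt, if_neg hlt]

-- ----- B's mark pass -----

def marksP : List Int → List (Int × Bool)
  | [] => []
  | x :: rest => (x, rest.all (fun y => decide (x ≤ y))) :: marksP rest

theorem mark_spec (l : List Int) :
    (da_sort_mark l).1 = marksP l ∧
    ((da_sort_mark l).2 = none ↔ l = []) ∧
    (∀ m, (da_sort_mark l).2 = some m → m ∈ l ∧ ∀ y ∈ l, m ≤ y) := by
  induction l with
  | nil => simp [da_sort_mark, marksP]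
  | cons x rest ih =>
    obtain ⟨ih1, ih2, ih3⟩ := ih
    rcases hpair : da_sort_mark rest with ⟨acc, m⟩
    rw [hpair] at ih1 ih2 ih3
    simp only at ih1 ih2 ih3
    cases m with
    | none =>
      have hrest : rest = [] := ih2.mp rfl
      subst hrest
      simp [da_sort_mark, marksP]
    | some mv =>
      obtain ⟨hmem, hmin⟩ := ih3 mv rfl
      by_cases hxm : x ≤ mv
      · have hall : rest.all (fun y => decide (x ≤ y)) = true := by
          rw [List.all_eq_true]
          intro y hy
          exact decide_eq_true (le_trans hxm (hmin y hy))
        refine ⟨?_, ?_, ?_⟩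
        · simp [da_sort_mark, hpair, if_pos hxm, marksP, ih1, hall]
        · simp [da_sort_mark, hpair, if_pos hxm]
        · intro m' hm'
          simp [da_sort_mark, hpair, if_pos hxm] at hm'
          subst hm'
          refine ⟨List.mem_cons_self, ?_⟩
          intro y hy
          rcases List.mem_cons.mp hy with rfl | hy
          · exact le_rfl
          · exact le_trans hxm (hmin y hy)
      · have hall : rest.all (fun y => decide (x ≤ y)) = false := by
          rw [List.all_eq_false]
          exact ⟨mv, hmem, by simpa using hxm⟩
        refine ⟨?_, ?_, ?_⟩
        · simp [da_sort_mark, hpair, if_neg hxm, marksP, ih1, hall]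
        · simp [da_sort_mark, hpair, if_neg hxm]
        · intro m' hm'
          simp [da_sort_mark, hpair, if_neg hxm] at hm'
          subst hm'
          refine ⟨List.mem_cons_of_mem _ hmem, ?_⟩
          intro y hy
          rcases List.mem_cons.mp hy with rfl | hy
          · omega
          · exact hmin y hy

theorem marksP_drop_cons (nums : List Int) (p : Nat) (hp : p < nums.length) :
    marksP (nums.drop p) = (nums.getD p 0, chainB nums p) :: marksP (nums.drop (p + 1)) := by
  have h := List.drop_eq_getElem_cons hp
  rw [h]
  have hgd : nums.getD p 0 = nums[p] := by
    simp [List.getD_eq_getElem?_getD, List.getElem?_eq_getElem hp]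
  simp only [marksP, chainB, hgd]

-- ----- B's scan pass equals the reference walk -----

def runSpec (nums : List Int) (run : Option Int) (p : Nat) : Prop :=
  (run = none ∧ ∀ l, l < p → chainP nums l) ∨
  (∃ r, run = some r ∧ (∃ l, l < p ∧ ¬ chainP nums l ∧ nums.getD l 0 = r) ∧
    (∀ l, l < p → ¬ chainP nums l → r ≤ nums.getD l 0))

theorem scan_eq_ref (nums : List Int) : ∀ (d p i count : Nat) (run : Option Int),
    i < p → p ≤ nums.length → nums.length - p ≤ d → chainP nums i →
    (∀ l, i < l → l < p → ¬ chainP nums l) → runSpec nums run p →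
    da_sort_scan nums.length (marksP (nums.drop p)) p count run true i = refWalk nums i count := by
  intro d
  induction d with
  | zero =>
    intro p i count run hip hpn hd hci hno hrun
    have hpn' : p = nums.length := by omega
    subst hpn'
    have hieq : i = nums.length - 1 := by
      by_contra hne
      exact hno (nums.length - 1) (by omega) (by omega) (chainP_last nums (by omega))
    rw [List.drop_length]
    rw [refWalk, if_neg (by omega)]
    simp [marksP, da_sort_scan]
  | succ d ih =>
    intro p i count run hip hpn hd hci hno hrun
    by_cases hp : p < nums.length
    case neg =>
      have hpn' : p = nums.length := by omega
      subst hpn'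
      have hieq : i = nums.length - 1 := by
        by_contra hne
        exact hno (nums.length - 1) (by omega) (by omega) (chainP_last nums (by omega))
      rw [List.drop_length]
      rw [refWalk, if_neg (by omega)]
      simp [marksP, da_sort_scan]
    case pos =>
      rw [marksP_drop_cons nums p hp]
      simp only [da_sort_scan]
      cases hcb : chainB nums p
      case false =>
        have hncp : ¬ chainP nums p := by
          intro h; rw [(chainB_iff nums p).mpr h] at hcb; cases hcb
        simp only [Bool.false_eq_true, if_false]
        have hno' : ∀ l, i < l → l < p + 1 → ¬ chainP nums l := by
          intro l h1 h2
          rcases Nat.lt_or_ge l p with h | h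
          · exact hno l h1 h
          · have : l = p := by omega
            subst this; exact hncp
        rcases hrun with ⟨hnone, hall⟩ | ⟨r, hsome, ⟨l0, hl0, hl0n, hl0v⟩, hmin⟩
        · subst hnone
          refine ih (p + 1) i count (some (nums.getD p 0)) (by omega) (by omega) (by omega)
            hci hno' ?_
          refine Or.inr ⟨nums.getD p 0, rfl, ⟨p, by omega, hncp, rfl⟩, ?_⟩
          intro l hl hln
          rcases Nat.lt_or_ge l p with h | h
          · exact absurd (hall l h) hln
          · have : l = p := by omega
            subst this; exact le_rfl
        · subst hsome
          refine ih (p + 1) i count (some (min r (nums.getD p 0))) (by omega) (by omega)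
            (by omega) hci hno' ?_
          refine Or.inr ⟨min r (nums.getD p 0), rfl, ?_, ?_⟩
          · rcases le_total r (nums.getD p 0) with h | h
            · exact ⟨l0, by omega, hl0n, by rw [hl0v]; omega⟩
            · exact ⟨p, by omega, hncp, by omega⟩
          · intro l hl hln
            rcases Nat.lt_or_ge l p with h | h
            · have := hmin l h hln; omega
            · have : l = p := by omega
              subst this; omega
      case true =>
        have hcp : chainP nums p := (chainB_iff nums p).mp hcb
        have hpeq : return_index_of_min_item nums (i + 1) = p :=
          retMin_eq nums (i + 1) p (by omega) hcp (by omega)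
            (by intro l h1 h2; exact hno l (by omega) h2)
        have hrange : ((List.range p).any
              (fun l => !chainB nums l && decide (nums.getD l 0 < nums.getD p 0)) = true) ↔
            ∃ l, l < p ∧ ¬ chainP nums l ∧ nums.getD l 0 < nums.getD p 0 := by
          simp only [List.any_eq_true, List.mem_range, Bool.and_eq_true,
            Bool.not_eq_eq_eq_not, Bool.not_true, decide_eq_true_eq]
          constructor
          · rintro ⟨l, h1, h2, h3⟩
            refine ⟨l, h1, ?_, h3⟩
            intro hc; rw [(chainB_iff nums l).mpr hc] at h2; cases h2
          · rintro ⟨l, h1, h2, h3⟩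
            refine ⟨l, h1, ?_, h3⟩
            cases h : chainB nums l
            · rfl
            · exact absurd ((chainB_iff nums l).mp h) h2
        have hrec : da_sort_scan nums.length (marksP (nums.drop (p + 1))) (p + 1)
              (count + 1) run true p = refWalk nums p (count + 1) := by
          refine ih (p + 1) p (count + 1) run (by omega) (by omega) (by omega) hcp
            (by intro l h1 h2; omega) ?_
          rcases hrun with ⟨hnone, hall⟩ | ⟨r, hsome, hat, hmin⟩
          · refine Or.inl ⟨hnone, ?_⟩
            intro l hl
            rcases Nat.lt_or_ge l p with h | h
            · exact hall l h
            · have : l = p := by omega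
              subst this; exact hcp
          · refine Or.inr ⟨r, hsome, ?_, ?_⟩
            · obtain ⟨l0, h1, h2, h3⟩ := hat
              exact ⟨l0, by omega, h2, h3⟩
            · intro l hl hln
              rcases Nat.lt_or_ge l p with h | h
              · exact hmin l h hln
              · have : l = p := by omega
                subst this; exact absurd hcp hln
        have hrw : refWalk nums i count =
            if ((List.range p).any
                (fun l => !chainB nums l && decide (nums.getD l 0 < nums.getD p 0))) then
              (nums.length : Int) - 1 - (count : Int)
            else refWalk nums p (count + 1) := by
          rw [refWalk]
          simp only []
          rw [if_pos (by omega : i + 1 < nums.length), hpeq]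
        rw [hrw]
        simp only [if_true]
        rcases hrun with ⟨hnone, hall⟩ | ⟨r, hsome, ⟨l0, hl0, hl0n, hl0v⟩, hmin⟩
        · subst hnone
          have hfalse : ((List.range p).any
              (fun l => !chainB nums l && decide (nums.getD l 0 < nums.getD p 0))) = false := by
            cases h : (List.range p).any
                (fun l => !chainB nums l && decide (nums.getD l 0 < nums.getD p 0))
            · rfl
            · obtain ⟨l, h1, h2, _⟩ := hrange.mp h
              exact absurd (hall l h1) h2
          rw [if_neg (by simp)]
          rw [if_neg (by rw [hfalse]; exact Bool.false_ne_true)]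
          exact hrec
        · subst hsome
          by_cases hrv : r < nums.getD p 0
          · have htrue : ((List.range p).any
                (fun l => !chainB nums l && decide (nums.getD l 0 < nums.getD p 0))) = true :=
              hrange.mpr ⟨l0, hl0, hl0n, by omega⟩
            rw [if_pos (by simp only [decide_eq_true_eq]; exact hrv : (match some r with | some r => decide (r < nums.getD p 0) | none => false) = true)]
            rw [if_pos htrue]
          · have hfalse : ((List.range p).any
                (fun l => !chainB nums l && decide (nums.getD l 0 < nums.getD p 0))) = false := by
              cases h : (List.range p).any
                  (fun l => !chainB nums l && decide (nums.getD l 0 < nums.getD p 0))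
              · rfl
              · obtain ⟨l, h1, h2, h3⟩ := hrange.mp h
                have := hmin l h1 h2
                omega
            rw [if_neg (by simp only [decide_eq_true_eq]; exact hrv)]
            rw [if_neg (by rw [hfalse]; exact Bool.false_ne_true)]
            exact hrec

-- ----- the prescan (before the first chain position) -----

def runSpecPre (nums : List Int) (run : Option Int) (p : Nat) : Prop :=
  (run = none ∧ p = 0) ∨
  (∃ r, run = some r ∧ (∃ l, l < p ∧ nums.getD l 0 = r) ∧ (∀ l, l < p → r ≤ nums.getD l 0))

theorem prescan_eq_ref (nums : List Int) (hn : 0 < nums.length) :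
    ∀ (d p : Nat) (run : Option Int),
    p ≤ return_index_of_min_item nums 0 → return_index_of_min_item nums 0 - p ≤ d →
    (∀ l, l < p → ¬ chainP nums l) → runSpecPre nums run p →
    da_sort_scan nums.length (marksP (nums.drop p)) p 0 run false 0 =
      refWalk nums (return_index_of_min_item nums 0) 0 := by
  obtain ⟨_, hc0n, hc0c, hc0min⟩ := retMin_spec nums 0 hn
  intro d
  induction d with
  | zero =>
    intro p run hpc hd hno hrun
    have hpeq : p = return_index_of_min_item nums 0 := by omega
    subst hpeq
    rw [marksP_drop_cons nums _ hc0n]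
    simp only [da_sort_scan]
    rw [if_pos (by rw [(chainB_iff nums _).mpr hc0c]), if_neg (by simp)]
    -- after the first chain position: hand over to the main scan lemma
    refine scan_eq_ref nums (nums.length) _ _ 0 run (by omega) (by omega) (by omega) hc0c
      (by intro l h1 h2; omega) ?_
    rcases hrun with ⟨hnone, hp0⟩ | ⟨r, hsome, ⟨l0, hl0, hl0v⟩, hmin⟩
    · refine Or.inl ⟨hnone, ?_⟩
      intro l hl
      have : l = return_index_of_min_item nums 0 := by omega
      subst this; exact hc0c
    · refine Or.inr ⟨r, hsome, ⟨l0, by omega, hc0min l0 (by omega) hl0, hl0v⟩, ?_⟩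
      intro l hl hln
      rcases Nat.lt_or_ge l (return_index_of_min_item nums 0) with h | h
      · exact hmin l h
      · have : l = return_index_of_min_item nums 0 := by omega
        subst this; exact absurd hc0c hln
  | succ d ih =>
    intro p run hpc hd hno hrun
    by_cases hpe : p = return_index_of_min_item nums 0
    case pos =>
      subst hpe
      rw [marksP_drop_cons nums _ hc0n]
      simp only [da_sort_scan]
      rw [if_pos (by rw [(chainB_iff nums _).mpr hc0c]), if_neg (by simp)]
      refine scan_eq_ref nums (nums.length) _ _ 0 run (by omega) (by omega) (by omega) hc0c
        (by intro l h1 h2; omega) ?_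
      rcases hrun with ⟨hnone, hp0⟩ | ⟨r, hsome, ⟨l0, hl0, hl0v⟩, hmin⟩
      · refine Or.inl ⟨hnone, ?_⟩
        intro l hl
        have : l = return_index_of_min_item nums 0 := by omega
        subst this; exact hc0c
      · refine Or.inr ⟨r, hsome, ⟨l0, by omega, hc0min l0 (by omega) hl0, hl0v⟩, ?_⟩
        intro l hl hln
        rcases Nat.lt_or_ge l (return_index_of_min_item nums 0) with h | h
        · exact hmin l h
        · have : l = return_index_of_min_item nums 0 := by omega
          subst this; exact absurd hc0c hln
    case neg =>
      have hplt : p < return_index_of_min_item nums 0 := by omega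
      have hpn : p < nums.length := by omega
      have hncp : ¬ chainP nums p := hc0min p (by omega) hplt
      have hcbf : chainB nums p = false := by
        cases h : chainB nums p
        · rfl
        · exact absurd ((chainB_iff nums p).mp h) hncp
      rw [marksP_drop_cons nums p hpn]
      simp only [da_sort_scan]
      rw [if_neg (by simp [hcbf])]
      refine ih (p + 1) _ (by omega) (by omega) ?_ ?_
      · intro l hl
        rcases Nat.lt_or_ge l p with h | h
        · exact hno l h
        · have : l = p := by omega
          subst this; exact hncp
      · rcases hrun with ⟨hnone, hp0⟩ | ⟨r, hsome, ⟨l0, hl0, hl0v⟩, hmin⟩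
        · subst hnone; subst hp0
          exact Or.inr ⟨nums.getD 0 0, rfl, ⟨0, by omega, rfl⟩, by
            intro l hl
            have : l = 0 := by omega
            subst this; exact le_rfl⟩
        · subst hsome
          refine Or.inr ⟨min r (nums.getD p 0), rfl, ?_, ?_⟩
          · rcases le_total r (nums.getD p 0) with h | h
            · exact ⟨l0, by omega, by rw [hl0v]; omega⟩
            · exact ⟨p, by omega, by omega⟩
          · intro l hl
            rcases Nat.lt_or_ge l p with h | h
            · have := hmin l h; omega
            · have : l = p := by omega
              subst this; omega

-- ===== VERDICT (by name: the statement is the Claim_ definition above) =====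
theorem da_sort_spec : Claim_equal_da_sort := by
  unfold Claim_equal_da_sort Spec_da_sort
  intro nums _
  rcases Nat.eq_zero_or_pos nums.length with hn | hn
  · have hnil : nums = [] := List.length_eq_zero_iff.mp hn
    subst hnil
    rw [da_sort]
    simp only [return_index_of_min_item] -- the argmin of [] is 0
    rw [da_sort_loop]
    simp [da_sort_alt]
  · rw [da_sort, da_sort_alt, if_neg (by omega)]
    obtain ⟨_, hc0n, hc0c, hc0min⟩ := retMin_spec nums 0 hn
    rw [(mark_spec nums).1]
    have hB : da_sort_scan nums.length (marksP nums) 0 0 none false 0 =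
        refWalk nums (return_index_of_min_item nums 0) 0 := by
      have := prescan_eq_ref nums hn (return_index_of_min_item nums 0) 0 none
        (by omega) (by omega) (by intro l hl; omega) (Or.inl ⟨rfl, rfl⟩)
      simpa using this
    rw [hB]
    refine loop_eq_ref nums nums.length _ 0 _ (by omega) hc0n hc0c ?_
    intro x
    rw [PySem.Set.mem_ofList, mem_take_iff_getD]
    constructor
    · rintro ⟨l, h1, h2, rfl⟩
      exact ⟨l, h1, hc0min l (by omega) h1, rfl⟩
    · rintro ⟨l, h1, h2, rfl⟩
      exact ⟨l, h1, by omega, rfl⟩
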